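-- pv_equiv track=rewrite | github.com/liuyanhui/leetcode-py | leetcode/984_string_without_aaa_or_bbb/string_without_aaa_or_bbb.py | strWithout3a3b_2
-- ===== SOURCE A (Python) =====
-- def strWithout3a3b_2(A, B):
--     """
--     strWithout3a3b_1()的另一种版本
--     :param A:
--     :param B:
--     :return:
--     """
--     if A <= 0 or B <= 0:
--         return ""
--     if A > 2 * B + 2 or B > 2 * A + 2:
--         return ""
--     ret = ""
--     if A > B:
--         n1, n2 = A, B
--         l1, l2 = "a", "b"
--     else:
--         n1, n2 = B, A
--         l1, l2 = "b", "a"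
--
--     while n1 > 0 or n2 > 0:
--         if n1 > n2 > 0:
--             ret += l1 * 2 + l2
--             n1 -= 2
--             n2 -= 1
--         elif n1 == n2:
--             ret += l1 + l2
--             n1 -= 1
--             n2 -= 1
--         elif n1 * n2 == 0:
--             ret += l1 * n1
--             n1 = 0
--     return ret
-- ===== SOURCE B (Python) =====
-- def strWithout3a3b_2(A, B):
--     if A <= 0 or B <= 0:
--         return ""
--     if A > 2 * B + 2 or B > 2 * A + 2:
--         return ""
--     if A > B:
--         M, m, l1, l2 = A, B, "a", "b"
--     else:
--         M, m, l1, l2 = B, A, "b", "a"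
--     D = M - m
--     k = min(D, m)
--     if D <= m:
--         return (l1 * 2 + l2) * k + (l1 + l2) * (m - D)
--     return (l1 * 2 + l2) * k + l1 * (D - m)
-- ===== Notes on version B (the rewrite author's own statement) =====
-- stated objective: simpler
-- what changed: Replaces A's greedy while-loop that appends one block per iteration by a direct closed-form concatenation: k = min(M-m, m) doubled blocks (l1*2+l2) followed by a uniform tail of (l1+l2) pairs or leftover l1's, with no loop.
import Mathlib
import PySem

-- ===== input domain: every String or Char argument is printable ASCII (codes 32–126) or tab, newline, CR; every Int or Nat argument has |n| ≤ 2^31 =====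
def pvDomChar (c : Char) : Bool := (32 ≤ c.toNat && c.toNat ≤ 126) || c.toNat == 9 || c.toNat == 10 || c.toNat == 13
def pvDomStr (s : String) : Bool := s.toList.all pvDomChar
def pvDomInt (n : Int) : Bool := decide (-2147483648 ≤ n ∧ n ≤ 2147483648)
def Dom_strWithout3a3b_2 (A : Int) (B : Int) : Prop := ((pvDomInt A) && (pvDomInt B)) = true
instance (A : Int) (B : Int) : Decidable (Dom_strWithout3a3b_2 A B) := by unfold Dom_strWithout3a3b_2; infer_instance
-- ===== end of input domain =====

-- B replaces A's greedy while-loop by a closed-form concatenation formula (k doubled blocks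
-- then a uniform tail), producing the identical string with no loop; objective: simpler.
-- Both ports build the result as a List Char (Python's one-char strings become Chars and
-- '+' on strings becomes list append, exact on this input space) and wrap it with String.ofList.

-- ===== PORT A =====
-- Python's s * n for a one-character string s (exact: empty for n <= 0)
def pyCharMul (c : Char) (n : Int) : List Char := List.replicate n.toNat c

-- the while-loop of A, fuel makes it total (Python would loop forever only in states
-- unreachable from the entry, e.g. n1 = 0 < n2; fuel is ample on all reachable states)
def loopA (l1 l2 : Char) : Nat → Int → Int → List Char → List Char
  | 0, _, _, ret => ret
  | fuel+1, n1, n2, ret =>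
    if n1 > 0 ∨ n2 > 0 then
      if n1 > n2 ∧ n2 > 0 then loopA l1 l2 fuel (n1-2) (n2-1) (ret ++ (pyCharMul l1 2 ++ [l2]))
      else if n1 = n2 then loopA l1 l2 fuel (n1-1) (n2-1) (ret ++ ([l1] ++ [l2]))
      else if n1 * n2 = 0 then loopA l1 l2 fuel 0 n2 (ret ++ pyCharMul l1 n1)
      else loopA l1 l2 fuel n1 n2 ret
    else ret

def strWithout3a3b_2 (A : Int) (B : Int) : String :=
  if A ≤ 0 ∨ B ≤ 0 then "" else
  if A > 2*B+2 ∨ B > 2*A+2 then "" else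
  if A > B then String.ofList (loopA 'a' 'b' ((A+B).toNat+1) A B [])
  else String.ofList (loopA 'b' 'a' ((A+B).toNat+1) B A [])

-- ===== PORT B =====
-- Python's s * n for a many-character string s (exact: empty for n <= 0)
def repChars (s : List Char) (n : Int) : List Char := (List.replicate n.toNat s).flatten

def closedForm (l1 l2 : Char) (M m : Int) : List Char :=
  let D := M - m
  let k := min D m
  if D ≤ m then repChars (repChars [l1] 2 ++ [l2]) k ++ repChars ([l1] ++ [l2]) (m - D)
  else repChars (repChars [l1] 2 ++ [l2]) k ++ repChars [l1] (D - m)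

def strWithout3a3b_2_alt (A : Int) (B : Int) : String :=
  if A ≤ 0 ∨ B ≤ 0 then "" else
  if A > 2*B+2 ∨ B > 2*A+2 then "" else
  if A > B then String.ofList (closedForm 'a' 'b' A B)
  else String.ofList (closedForm 'b' 'a' B A)

-- ===== PRECONDITION & SPEC =====
def Spec_strWithout3a3b_2 (A : Int) (B : Int) (out : String) : Prop := out = strWithout3a3b_2_alt A B
instance (A : Int) (B : Int) (out : String) : Decidable (Spec_strWithout3a3b_2 A B out) := by unfold Spec_strWithout3a3b_2; infer_instance

-- ===== CLAIM (what is proved, stated in full; the proofs are below) =====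
def Claim_equal_strWithout3a3b_2 : Prop := ∀ (A : Int) (B : Int), Dom_strWithout3a3b_2 A B → Spec_strWithout3a3b_2 A B (strWithout3a3b_2 A B)

-- ===== LEMMAS AND PROOFS =====

theorem repChars_nonpos (s : List Char) (n : Int) (h : n ≤ 0) : repChars s n = [] := by
  unfold repChars
  have : n.toNat = 0 := by omega
  rw [this]; rfl

theorem repChars_succ (s : List Char) (n : Int) (h : 0 < n) :
    repChars s n = s ++ repChars s (n-1) := by
  unfold repChars
  have : n.toNat = (n-1).toNat + 1 := by omega
  rw [this, List.replicate_succ, List.flatten_cons]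

theorem repChars_single (c : Char) (n : Int) : repChars [c] n = pyCharMul c n := by
  unfold repChars pyCharMul
  induction n.toNat with
  | zero => rfl
  | succ k ih => rw [List.replicate_succ, List.flatten_cons, List.replicate_succ]; simp [ih]

theorem loopA_eq (l1 l2 : Char) (fuel : Nat) (m D : Int) (ret : List Char)
    (hm : 0 ≤ m) (hD : 0 ≤ D) (hf : (m+D).toNat + 1 ≤ fuel) :
    loopA l1 l2 fuel (m+D) m ret = ret ++ closedForm l1 l2 (m+D) m := by
  induction fuel generalizing m D ret with
  | zero => omega
  | succ fuel ih =>
    by_cases hD0 : 0 < D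
    · by_cases hm0 : 0 < m
      · -- branch 1: n1 > n2 > 0
        rw [loopA, if_pos (by omega), if_pos (by omega)]
        rw [show (m + D - 2 : Int) = (m-1) + (D-1) by ring]
        rw [ih (m-1) (D-1) _ (by omega) (by omega) (by omega)]
        unfold closedForm
        have hmin : min D m = min (D-1) (m-1) + 1 := by omega
        have hsub : (m+D) - m = D := by ring
        have hsub' : ((m-1)+(D-1)) - (m-1) = D - 1 := by ring
        simp only [hsub, hsub', hmin]
        rw [repChars_succ _ (min (D-1) (m-1) + 1) (by omega)]
        rw [show min (D-1) (m-1) + 1 - 1 = min (D-1) (m-1) by ring]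
        by_cases hDm : D ≤ m
        · rw [if_pos hDm, if_pos (by omega : D - 1 ≤ m - 1)]
          rw [show m - 1 - (D - 1) = m - D by ring]
          simp [pyCharMul, repChars, List.replicate, List.append_assoc]
        · rw [if_neg hDm, if_neg (by omega : ¬ (D - 1 ≤ m - 1))]
          rw [show D - 1 - (m - 1) = D - m by ring]
          simp [pyCharMul, repChars, List.replicate, List.append_assoc]
      · -- m = 0, D > 0 : branch 3, then the loop exits
        have hm0' : m = 0 := by omega
        subst hm0'
        rw [loopA, if_pos (by omega), if_neg (by omega), if_neg (by omega),
            if_pos (by ring)]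
        cases fuel with
        | zero => omega
        | succ fuel' =>
          rw [loopA, if_neg (by omega)]
          unfold closedForm
          rw [if_neg (by omega : ¬ ((0:Int) + D - 0 ≤ 0))]
          rw [show min ((0:Int) + D - 0) 0 = 0 by omega, repChars_nonpos _ 0 le_rfl]
          rw [show (0:Int) + D - 0 - 0 = D by ring, repChars_single]
          simp [show (0:Int) + D = D by ring]
    · -- D = 0
      have hD0' : D = 0 := by omega
      subst hD0'
      by_cases hm0 : 0 < m
      · -- branch 2: n1 = n2 > 0
        rw [loopA, if_pos (by omega), if_neg (by omega), if_pos (by ring)]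
        rw [show (m + 0 - 1 : Int) = (m-1) + 0 by ring,
            show (m - 1 : Int) = m - 1 by ring]
        rw [ih (m-1) 0 _ (by omega) (by omega) (by omega)]
        unfold closedForm
        simp only [add_zero]
        rw [if_pos (by omega : m - m ≤ m), if_pos (by omega : m - 1 - (m-1) ≤ m - 1)]
        rw [show (m - m : Int) = 0 by ring, show (m - 1 - (m-1) : Int) = 0 by ring]
        rw [show min (0:Int) m = 0 by omega, show min (0:Int) (m-1) = 0 by omega]
        rw [repChars_nonpos _ 0 le_rfl, repChars_succ ([l1] ++ [l2]) (m - 0) (by omega)]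
        rw [show (m - 0 - 1 : Int) = m - 1 - 0 by ring]
        simp [List.append_assoc]
      · -- m = 0, D = 0 : loop exits immediately
        have : m = 0 := by omega
        subst this
        rw [loopA, if_neg (by omega)]
        unfold closedForm
        rw [if_pos (by omega : (0:Int) + 0 - 0 ≤ 0)]
        rw [show min ((0:Int) + 0 - 0) 0 = 0 by omega, repChars_nonpos _ 0 le_rfl,
            repChars_nonpos _ _ (by omega)]
        simp

-- ===== VERDICT (by name: the statement is the Claim_ definition above) =====
theorem strWithout3a3b_2_spec : Claim_equal_strWithout3a3b_2 := by
  intro A B _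
  unfold Spec_strWithout3a3b_2 strWithout3a3b_2 strWithout3a3b_2_alt
  by_cases h1 : A ≤ 0 ∨ B ≤ 0
  · rw [if_pos h1, if_pos h1]
  · rw [if_neg h1, if_neg h1]
    by_cases h2 : A > 2*B+2 ∨ B > 2*A+2
    · rw [if_pos h2, if_pos h2]
    · rw [if_neg h2, if_neg h2]
      by_cases h3 : A > B
      · rw [if_pos h3, if_pos h3]
        have e : A = B + (A - B) := by ring
        rw [show loopA 'a' 'b' ((A+B).toNat+1) A B [] =
              loopA 'a' 'b' ((A+B).toNat+1) (B + (A - B)) B [] by rw [← e],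
            loopA_eq 'a' 'b' _ B (A - B) [] (by omega) (by omega) (by omega)]
        rw [← e]; simp
      · rw [if_neg h3, if_neg h3]
        have e : B = A + (B - A) := by ring
        rw [show loopA 'b' 'a' ((A+B).toNat+1) B A [] =
              loopA 'b' 'a' ((A+B).toNat+1) (A + (B - A)) A [] by rw [← e],
            loopA_eq 'b' 'a' _ A (B - A) [] (by omega) (by omega) (by omega)]
        rw [← e]; simp
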